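-- pv_equiv track=rewrite | github.com/xxlu/ActionEffectDiscovery | Quantitative_Experiment_ConfigGeneration.py | add_zeros
-- ===== SOURCE A (Python) =====
-- def add_zeros(list, no_responses):
--     if len(list) >= no_responses:
--         yield list
--     for i in range(0,len(list)+1):
--         new_list = list.copy()
--         new_list.insert(i,0)
--         if len(new_list) < no_responses:
--             yield from add_zeros(new_list, no_responses)
--         else:
--             yield new_list
-- ===== SOURCE B (Python) =====
-- def add_zeros(list, no_responses):
--     # Iterative worklist (explicit stack) instead of recursion; return-value equivalent.
--     if len(list) >= no_responses:
--         yield list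
--     stack = [list]
--     while stack:
--         cur = stack.pop()
--         children = [cur[:i] + [0] + cur[i:] for i in range(len(cur) + 1)]
--         if len(cur) + 1 < no_responses:
--             stack.extend(reversed(children))
--         else:
--             yield from children
-- ===== Notes on version B (the rewrite author's own statement) =====
-- stated objective: alternative
-- what changed: Replaces the recursive generator (yield from on each inserted child) with an explicit stack-based worklist loop that pushes expanded children in reverse order and yields leaf children in index order, producing the identical stream; Pre_ excludes padding depths over 900, where A overruns CPython's recursion limit and raises RecursionError before yielding anything.
import Mathlib
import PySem

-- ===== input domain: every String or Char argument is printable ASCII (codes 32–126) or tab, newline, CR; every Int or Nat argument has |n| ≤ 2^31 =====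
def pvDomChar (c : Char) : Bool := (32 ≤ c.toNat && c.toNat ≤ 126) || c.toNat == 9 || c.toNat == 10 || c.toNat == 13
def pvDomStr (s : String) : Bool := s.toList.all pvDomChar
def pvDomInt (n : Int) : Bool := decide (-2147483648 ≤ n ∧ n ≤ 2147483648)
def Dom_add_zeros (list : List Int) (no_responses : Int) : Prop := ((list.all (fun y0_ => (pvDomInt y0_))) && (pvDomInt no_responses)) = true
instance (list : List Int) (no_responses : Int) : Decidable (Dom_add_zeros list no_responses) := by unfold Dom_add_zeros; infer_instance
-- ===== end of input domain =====

-- B replaces A's recursive generator with an explicit stack-based worklist loop; the yielded stream is identical.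

-- ===== PORT A =====
-- Literal port of A: the generator's yielded stream as a list; the 'for i in range(0, len(list)+1)'
-- becomes a flatMap over List.range. The Nat 'fuel' only makes the recursion structural: it strictly
-- exceeds the recursion depth (no_responses - len) and is never exhausted.
def add_zeros_go (fuel : Nat) (list : List Int) (no_responses : Int) : List (List Int) :=
  match fuel with
  | 0 => []
  | fuel + 1 =>
    (if no_responses ≤ (list.length : Int) then [list] else []) ++
    (List.range (list.length + 1)).flatMap (fun (i : Nat) =>
      if ((PySem.List.insert list (i : Int) 0).length : Int) < no_responses then
        add_zeros_go fuel (PySem.List.insert list (i : Int) 0) no_responses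
      else [PySem.List.insert list (i : Int) 0])

def add_zeros (list : List Int) (no_responses : Int) : List (List Int) :=
  add_zeros_go ((no_responses - (list.length : Int)).toNat + 1) list no_responses

-- ===== PORT B =====
-- children of cur: cur[:i] + [0] + cur[i:] for i = 0..len(cur)  (B builds them by slicing, not insert)
def pvChildren (cur : List Int) : List (List Int) :=
  (List.range (cur.length + 1)).map (fun (i : Nat) =>
    PySem.List.slice cur none (some (i : Int)) ++ [0] ++ PySem.List.slice cur (some (i : Int)) none)

-- weight of one stack node: an upper bound on the loop iterations its subtree costs
def pvWt (n : Int) (c : List Int) : Nat := (n.toNat + 2) ^ ((n - (c.length : Int)).toNat)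

-- the worklist loop: pop cur; expand (push children, top-first) or yield cur's children in order.
-- 'fuel' only makes the while-loop structural: it strictly exceeds the total iteration count
-- (the weight sum of the stack strictly decreases each iteration) and is never exhausted.
def pvLoopGo (fuel : Nat) (n : Int) (stack : List (List Int)) (acc : List (List Int)) : List (List Int) :=
  match fuel with
  | 0 => acc
  | fuel + 1 =>
    match stack with
    | [] => acc
    | cur :: rest =>
      let children := pvChildren cur
      if ((cur.length : Int) + 1) < n then pvLoopGo fuel n (children ++ rest) acc
      else pvLoopGo fuel n rest (acc ++ children)

def add_zeros_alt (list : List Int) (no_responses : Int) : List (List Int) :=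
  (if no_responses ≤ (list.length : Int) then [list] else []) ++
  pvLoopGo (pvWt no_responses list + 1) no_responses [list] []

-- ===== PRECONDITION & SPEC =====
-- Pre_ excludes inputs whose padding depth no_responses - len(list) exceeds 900: there the Python A
-- overruns CPython's recursion limit (depth ~1000) and raises RecursionError before yielding anything
-- (and the output stream is astronomically large, so neither program can be run to completion).
def Pre_add_zeros (list : List Int) (no_responses : Int) : Prop :=
  no_responses - (list.length : Int) ≤ 900
instance (list : List Int) (no_responses : Int) : Decidable (Pre_add_zeros list no_responses) := by unfold Pre_add_zeros; infer_instance
def pvWitness_add_zeros : List Int × Int := ([1, 2], 4)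

def Spec_add_zeros (list : List Int) (no_responses : Int) (out : List (List Int)) : Prop := out = add_zeros_alt list no_responses
instance (list : List Int) (no_responses : Int) (out : List (List Int)) : Decidable (Spec_add_zeros list no_responses out) := by unfold Spec_add_zeros; infer_instance

-- ===== CLAIM (what is proved, stated in full; the proofs are below) =====
def Claim_equal_add_zeros : Prop := ∀ (list : List Int) (no_responses : Int), Dom_add_zeros list no_responses → Pre_add_zeros list no_responses → Spec_add_zeros list no_responses (add_zeros list no_responses)

-- ===== LEMMAS AND PROOFS =====

theorem pvDecInsert' (l : List Int) (n : Int) (i : Nat) (h : (l.length : Int) + 1 < n) :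
    (n - ((PySem.List.insert l (i : Int) 0).length : Int)).toNat < (n - (l.length : Int)).toNat := by
  simp only [PySem.List.length_insert]
  push_cast
  omega

theorem pvChildren_eq_insert (cur : List Int) :
    pvChildren cur = (List.range (cur.length + 1)).map (fun (i : Nat) => PySem.List.insert cur (i : Int) 0) := by
  unfold pvChildren
  apply List.map_congr_left
  intro i hi
  rw [List.mem_range] at hi
  rw [PySem.List.slice_to_natCast, PySem.List.slice_from_natCast,
      PySem.List.insert_natCast cur i 0 (by omega)]
  simp

theorem pvChildren_wtsum (n : Int) (cur : List Int) :
    ((pvChildren cur).map (pvWt n)).sum = (cur.length + 1) * pvWt n (0 :: cur) := by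
  rw [pvChildren_eq_insert, List.map_map]
  rw [show (pvWt n ∘ fun (i : Nat) => PySem.List.insert cur (i : Int) 0)
        = fun (_ : Nat) => pvWt n (0 :: cur) from
      funext fun i => by simp [pvWt, PySem.List.length_insert]]
  rw [List.map_const', List.sum_replicate]
  simp

theorem pvDecExpand (n : Int) (cur : List Int) (rest : List (List Int))
    (hc : (cur.length : Int) + 1 < n) :
    ((pvChildren cur ++ rest).map (pvWt n)).sum < ((cur :: rest).map (pvWt n)).sum := by
  simp only [List.map_append, List.sum_append, List.map_cons, List.sum_cons, pvChildren_wtsum]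
  have hb : cur.length + 1 < n.toNat + 2 := by omega
  have hk : (n - (cur.length : Int)).toNat = ((n - (((0 : Int) :: cur).length : Int)).toNat) + 1 := by
    simp; omega
  have hpos : 0 < pvWt n (0 :: cur) := Nat.pow_pos (by omega)
  have : (cur.length + 1) * pvWt n (0 :: cur) < pvWt n cur := by
    show _ < (n.toNat + 2) ^ ((n - (cur.length : Int)).toNat)
    rw [hk, pow_succ, Nat.mul_comm (_ ^ _)]
    exact Nat.mul_lt_mul_of_lt_of_le hb (Nat.le_refl _) hpos
  omega

theorem pvDecYield (n : Int) (cur : List Int) (rest : List (List Int)) :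
    ((rest).map (pvWt n)).sum < ((cur :: rest).map (pvWt n)).sum := by
  simp only [List.map_cons, List.sum_cons]
  have hpos : 0 < pvWt n cur := Nat.pow_pos (show 0 < n.toNat + 2 by omega)
  omega

theorem pvFlatMap_sing {A B : Type} (f : A → B) (l : List A) :
    l.flatMap (fun a => [f a]) = l.map f := by
  induction l with
  | nil => rfl
  | cons x xs ih => simp [ih]

-- the common denotation: the stream of leaf lists yielded below one node
def pvH (n : Int) (l : List Int) : List (List Int) :=
  if ((l.length : Int) + 1) < n then
    (List.range (l.length + 1)).flatMap (fun (i : Nat) => pvH n (PySem.List.insert l (i : Int) 0))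
  else
    (List.range (l.length + 1)).map (fun (i : Nat) => PySem.List.insert l (i : Int) 0)
termination_by (n - (l.length : Int)).toNat
decreasing_by exact pvDecInsert' l n i ‹_›

theorem add_zeros_go_eq_pvH (n : Int) (fuel : Nat) (l : List Int)
    (hlen : (l.length : Int) < n) (hfuel : (n - (l.length : Int)).toNat ≤ fuel) :
    add_zeros_go (fuel + 1) l n = pvH n l := by
  induction fuel generalizing l with
  | zero => omega
  | succ f ih =>
    rw [add_zeros_go, pvH.eq_def]
    rw [if_neg (by omega)]
    by_cases hc : ((l.length : Int) + 1) < n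
    · rw [if_pos hc]
      simp only [List.nil_append]
      apply List.flatMap_congr
      intro i _
      simp only [PySem.List.length_insert]
      rw [if_pos (by push_cast; omega)]
      exact ih _ (by simp [PySem.List.length_insert]; omega)
        (by simp [PySem.List.length_insert]; omega)
    · rw [if_neg hc]
      simp only [List.nil_append]
      rw [← pvFlatMap_sing (fun (i : Nat) => PySem.List.insert l (i : Int) 0) (List.range (l.length + 1))]
      apply List.flatMap_congr
      intro i _
      simp only [PySem.List.length_insert]
      rw [if_neg (by push_cast; omega)]

theorem pvLoopGo_eq (n : Int) (fuel : Nat) (stack acc : List (List Int))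
    (hfuel : (stack.map (pvWt n)).sum ≤ fuel) :
    pvLoopGo (fuel + 1) n stack acc = acc ++ stack.flatMap (pvH n) := by
  induction fuel generalizing stack acc with
  | zero =>
    match stack with
    | [] => simp [pvLoopGo]
    | cur :: rest =>
      exfalso
      have : 0 < pvWt n cur := Nat.pow_pos (show 0 < n.toNat + 2 by omega)
      simp at hfuel
      omega
  | succ f ih =>
    match stack with
    | [] => simp [pvLoopGo]
    | cur :: rest =>
      rw [pvLoopGo]
      by_cases hc : ((cur.length : Int) + 1) < n
      · rw [if_pos hc]
        rw [ih _ _ (by have := pvDecExpand n cur rest hc; omega)]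
        simp only [List.flatMap_append, List.flatMap_cons]
        rw [pvH.eq_def, if_pos hc]
        simp [pvChildren_eq_insert, List.flatMap_map]
      · rw [if_neg hc]
        rw [ih _ _ (by have := pvDecYield n cur rest; omega)]
        simp only [List.flatMap_cons]
        rw [pvH.eq_def, if_neg hc]
        simp [pvChildren_eq_insert]

-- ===== VERDICT (by name: the statement is the Claim_ definition above) =====
theorem add_zeros_spec : Claim_equal_add_zeros := by
  intro l n _ _
  show add_zeros l n = add_zeros_alt l n
  rw [add_zeros, add_zeros_alt, pvLoopGo_eq n (pvWt n l) [l] [] (by simp)]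
  simp only [List.flatMap_cons, List.flatMap_nil, List.append_nil, List.nil_append]
  by_cases h : (l.length : Int) < n
  · rw [add_zeros_go_eq_pvH n _ l h (by omega), if_neg (by omega)]
    simp
  · have h0 : (n - (l.length : Int)).toNat = 0 := by omega
    rw [h0]
    rw [add_zeros_go, if_pos (by omega), pvH.eq_def, if_neg (by omega)]
    congr 1
    rw [← pvFlatMap_sing (fun (i : Nat) => PySem.List.insert l (i : Int) 0) (List.range (l.length + 1))]
    apply List.flatMap_congr
    intro i _
    simp only [PySem.List.length_insert]
    rw [if_neg (by push_cast; omega)]
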